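-- pv_equiv track=rewrite | github.com/AdMind-ai/InvestorAI | backend/core/utils/marketNews/create_pdf.py | normalize_markdown_tables
-- ===== SOURCE A (Python) =====
-- def normalize_markdown_tables(md: str) -> str:
--     """Normalize GFM-style tables so the Markdown library recognizes them.
--
--     - Remove leading indentation from lines that start with '|'
--     - Ensure a blank line before a table block
--     - Ensure a blank line after a table block
--     - Do not modify content inside fenced code blocks
--     """
--     lines = md.splitlines()
--     in_code = False
--     interim = []
--
--     # 1) Left-trim lines that start with '|' outside fenced code
--     for line in lines:
--         stripped = line.lstrip()
--         if stripped.startswith('```'):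
--             in_code = not in_code
--             interim.append(line)
--             continue
--         if not in_code and stripped.startswith('|'):
--             interim.append(stripped)
--         else:
--             interim.append(line)
--
--     def is_pipe_line(s: str) -> bool:
--         s = s.strip()
--         return s.startswith('|') and '|' in s[1:]
--
--     def is_separator_line(s: str) -> bool:
--         s = s.strip()
--         if '|' not in s:
--             return False
--         # Remove pipes and spaces, check remaining chars are '-' or ':' only
--         core = s.replace('|', '').replace(' ', '')
--         if not core:
--             return False
--         return all(ch in '-:' for ch in core) and '-' in core
--
--     # 2) Insert blank lines before and after table blocks
--     result = []
--     i = 0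
--     n = len(interim)
--     while i < n:
--         line = interim[i]
--         next_line = interim[i+1] if i + 1 < n else ''
--         # Detect start of a table block: a pipe line followed by a separator line
--         if is_pipe_line(line) and is_separator_line(next_line):
--             # Ensure a blank line before table
--             if result and result[-1].strip() != '':
--                 result.append('')
--             # Append header and separator
--             result.append(line.strip())
--             result.append(next_line.strip())
--             i += 2
--             # Append subsequent table rows (pipe lines)
--             while i < n and is_pipe_line(interim[i]):
--                 result.append(interim[i].strip())
--                 i += 1
--             # Ensure a blank line after table if not already present
--             if i < n and interim[i].strip() != '':
--                 result.append('')
--             continue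
--         else:
--             result.append(line)
--             i += 1
--
--     return '\n'.join(result)
-- ===== SOURCE B (Python) =====
-- def normalize_markdown_tables(md: str) -> str:
--     """Normalize GFM tables: two-pass phase 2 — segment the lines into
--     (plain, table-block) pairs first, then emit with blank-line padding."""
--     lines = md.splitlines()
--     in_code = False
--     interim = []
--     for line in lines:
--         stripped = line.lstrip()
--         if stripped.startswith('```'):
--             in_code = not in_code
--             interim.append(line)
--             continue
--         if not in_code and stripped.startswith('|'):
--             interim.append(stripped)
--         else:
--             interim.append(line)
--
--     segs = _segments(interim)
--     out = []
--     for i, (plain, block) in enumerate(segs):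
--         out.extend(plain)
--         if block:
--             if plain and plain[-1].strip():
--                 out.append('')
--             out.extend(l.strip() for l in block)
--             nxt_plain, nxt_block = segs[i + 1]
--             nxt = nxt_plain + nxt_block
--             if nxt and nxt[0].strip():
--                 out.append('')
--     return '\n'.join(out)
--
--
-- def _is_pipe(s: str) -> bool:
--     s = s.strip()
--     return s.startswith('|') and '|' in s[1:]
--
--
-- def _is_sep(s: str) -> bool:
--     s = s.strip()
--     if '|' not in s:
--         return False
--     core = s.replace('|', '').replace(' ', '')
--     if not core:
--         return False
--     return all(ch in '-:' for ch in core) and '-' in core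
--
--
-- def _segments(lines):
--     """Split into (plain_lines, table_block) pairs; the last pair has block == []."""
--     segs = []
--     plain = []
--     rest = lines
--     while rest:
--         if len(rest) >= 2 and _is_pipe(rest[0]) and _is_sep(rest[1]):
--             block = [rest[0], rest[1]]
--             rest = rest[2:]
--             while rest and _is_pipe(rest[0]):
--                 block.append(rest[0])
--                 rest = rest[1:]
--             segs.append((plain, block))
--             plain = []
--         else:
--             plain.append(rest[0])
--             rest = rest[1:]
--     segs.append((plain, []))
--     return segs
-- ===== Notes on version B (the rewrite author's own statement) =====
-- stated objective: alternative
-- what changed: Phase 2 is restructured from A's single index loop that inserts padding while looking back into the growing result list into two sub-passes: first segment the lines into (plain-lines, table-block) pairs, then emit the segments, deciding the surrounding blank lines locally from each segment and its successor.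
import Mathlib
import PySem

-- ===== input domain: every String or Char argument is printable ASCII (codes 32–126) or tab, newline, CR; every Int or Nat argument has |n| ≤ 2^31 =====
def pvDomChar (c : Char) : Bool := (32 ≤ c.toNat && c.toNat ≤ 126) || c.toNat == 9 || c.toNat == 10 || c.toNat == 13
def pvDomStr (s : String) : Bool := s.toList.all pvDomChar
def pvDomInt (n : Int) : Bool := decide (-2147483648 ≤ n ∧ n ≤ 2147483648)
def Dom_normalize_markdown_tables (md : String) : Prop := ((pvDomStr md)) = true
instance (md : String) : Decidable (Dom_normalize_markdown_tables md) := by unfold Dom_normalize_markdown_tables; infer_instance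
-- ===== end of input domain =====

-- B normalizes the same tables via a two-pass phase 2 (segment the lines into (plain, table-block)
-- pairs, then emit them with blank padding) instead of A's single accumulator loop; objective: alternative.

-- shared helper predicates (identical in Source A and Source B)
def is_pipe_line (s : String) : Bool :=
  let t := PySem.Str.strip s
  PySem.Str.startswith t "|" && PySem.Str.isIn "|" (PySem.Str.slice t (some 1) none)

def is_separator_line (s : String) : Bool :=
  let t := PySem.Str.strip s
  if !PySem.Str.isIn "|" t then false
  else
    let core := PySem.Str.replace (PySem.Str.replace t "|" "") " " ""
    if core = "" then false
    else core.toList.all (fun c => c == '-' || c == ':') && PySem.Str.isIn "-" core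

-- ===== PORT A =====
-- phase 1 of A: explicit recursion with (in_code, interim) state
def phase1A (in_code : Bool) (interim : List String) : List String → List String
  | [] => interim
  | line :: rest =>
    let stripped := PySem.Str.lstrip line
    if PySem.Str.startswith stripped "```" then
      phase1A (!in_code) (interim ++ [line]) rest
    else if !in_code && PySem.Str.startswith stripped "|" then
      phase1A in_code (interim ++ [stripped]) rest
    else
      phase1A in_code (interim ++ [line]) rest

-- phase 2 of A: the while-loop over `interim` with the `result` accumulator
def loopA (result : List String) (ls : List String) : List String :=
  match ls with
  | [] => result
  | line :: rest =>
    let next_line := rest.headD ""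
    if is_pipe_line line && is_separator_line next_line then
      let r1 := if result ≠ [] ∧ PySem.Str.strip (result.getLastD "") ≠ "" then result ++ [""] else result
      let r2 := r1 ++ [PySem.Str.strip line, PySem.Str.strip next_line]
      let rest2 := rest.tail
      let rows := rest2.takeWhile is_pipe_line
      let after := rest2.dropWhile is_pipe_line
      let r3 := r2 ++ rows.map PySem.Str.strip
      let r4 := if after ≠ [] ∧ PySem.Str.strip (after.headD "") ≠ "" then r3 ++ [""] else r3
      loopA r4 after
    else loopA (result ++ [line]) rest
  termination_by ls.length
  decreasing_by
  · have h1 := List.length_dropWhile_le is_pipe_line rest.tail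
    have h2 : rest.tail.length ≤ rest.length := by cases rest <;> simp
    simp only [List.length_cons]; omega
  · simp

def normalize_markdown_tables (md : String) : String :=
  PySem.Str.join "\n" (loopA [] (phase1A false [] (PySem.Str.splitlines md)))

-- ===== PORT B =====
-- phase 1 of B: a fold over the lines carrying the (in_code, acc) pair
def phase1B (lines : List String) : List String :=
  (lines.foldl (fun (st : Bool × List String) line =>
    let stripped := PySem.Str.lstrip line
    if PySem.Str.startswith stripped "```" then (!st.1, st.2 ++ [line])
    else if !st.1 && PySem.Str.startswith stripped "|" then (st.1, st.2 ++ [stripped])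
    else (st.1, st.2 ++ [line])) (false, [])).2

-- B sub-pass 1: split the lines into (plain_lines, table_block) segments (last block is [])
def segs_go (plain : List String) (ls : List String) : List (List String × List String) :=
  match ls with
  | [] => [(plain, [])]
  | [l0] => segs_go (plain ++ [l0]) []
  | l0 :: l1 :: rest2 =>
    if is_pipe_line l0 && is_separator_line l1 then
      let rows := rest2.takeWhile is_pipe_line
      let after := rest2.dropWhile is_pipe_line
      (plain, l0 :: l1 :: rows) :: segs_go [] after
    else segs_go (plain ++ [l0]) (l1 :: rest2)
  termination_by ls.length
  decreasing_by
  · simp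
  · have h1 := List.length_dropWhile_le is_pipe_line rest2
    simp only [List.length_cons]; omega
  · simp

-- B sub-pass 2: emit the segments with blank-line padding around each block
def emit : List (List String × List String) → List String
  | [] => []
  | (plain, block) :: rest =>
    plain ++
      (if block ≠ [] then
        (if plain ≠ [] ∧ PySem.Str.strip (plain.getLastD "") ≠ "" then [""] else []) ++
        block.map PySem.Str.strip ++
        (let nxt := (rest.headD ([], [])).1 ++ (rest.headD ([], [])).2
         if nxt ≠ [] ∧ PySem.Str.strip (nxt.headD "") ≠ "" then [""] else [])
      else []) ++ emit rest

def normalize_markdown_tables_alt (md : String) : String :=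
  PySem.Str.join "\n" (emit (segs_go [] (phase1B (PySem.Str.splitlines md))))

-- ===== PRECONDITION & SPEC =====
def Spec_normalize_markdown_tables (md : String) (out : String) : Prop := out = normalize_markdown_tables_alt md
instance (md : String) (out : String) : Decidable (Spec_normalize_markdown_tables md out) := by unfold Spec_normalize_markdown_tables; infer_instance

-- ===== CLAIM (what is proved, stated in full; the proofs are below) =====
def Claim_equal_normalize_markdown_tables : Prop := ∀ (md : String), Dom_normalize_markdown_tables md → Spec_normalize_markdown_tables md (normalize_markdown_tables md)

-- ===== LEMMAS AND PROOFS =====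

-- `ls` starts a table block (a pipe line followed by a separator line)
def isBlockStart : List String → Prop
  | l0 :: l1 :: _ => (is_pipe_line l0 && is_separator_line l1) = true
  | _ => False

theorem sep_empty : is_separator_line "" = false := by decide

theorem getLastD_app (l : List String) (h : l ≠ []) (r : List String) (d : String) :
    (r ++ l).getLastD d = l.getLastD d := by
  obtain ⟨q, x, rfl⟩ := List.eq_nil_or_concat l |>.resolve_left h
  simp [List.concat_eq_append, ← List.append_assoc]

theorem dropWhile_head (p : String → Bool) (l : List String) (a : String) (t : List String)
    (h : l.dropWhile p = a :: t) : p a = false := by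
  induction l with
  | nil => simp at h
  | cons x xs ih =>
    rw [List.dropWhile_cons] at h
    split at h
    · exact ih h
    · cases h; simp_all

-- unfolding lemmas for the two worker recursions
theorem loopA_nil (r : List String) : loopA r [] = r := by rw [loopA]

theorem loopA_cons_neg (r : List String) (l0 : String) (rest : List String)
    (h : (is_pipe_line l0 && is_separator_line (rest.head?.getD "")) = false) :
    loopA r (l0 :: rest) = loopA (r ++ [l0]) rest := by
  rw [loopA]
  simp [h]

theorem loopA_cons_pos (r : List String) (l0 l1 : String) (rest2 : List String)
    (h : (is_pipe_line l0 && is_separator_line l1) = true) :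
    loopA r (l0 :: l1 :: rest2) =
      loopA (((if r ≠ [] ∧ PySem.Str.strip (r.getLastD "") ≠ "" then r ++ [""] else r)
          ++ [PySem.Str.strip l0, PySem.Str.strip l1]
          ++ (rest2.takeWhile is_pipe_line).map PySem.Str.strip)
          ++ (if rest2.dropWhile is_pipe_line ≠ [] ∧
                PySem.Str.strip ((rest2.dropWhile is_pipe_line).headD "") ≠ "" then [""] else []))
        (rest2.dropWhile is_pipe_line) := by
  rw [loopA]
  simp only [List.headD_cons, List.tail_cons, h, if_pos]
  split_ifs <;> simp [List.append_assoc]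

theorem segs_nil (p : List String) : segs_go p [] = [(p, [])] := by rw [segs_go]

theorem segs_one (p : List String) (l0 : String) : segs_go p [l0] = [(p ++ [l0], [])] := by
  rw [segs_go, segs_go]

theorem segs_cons_neg (p : List String) (l0 l1 : String) (rest2 : List String)
    (h : (is_pipe_line l0 && is_separator_line l1) = false) :
    segs_go p (l0 :: l1 :: rest2) = segs_go (p ++ [l0]) (l1 :: rest2) := by
  rw [segs_go]; simp [h]

theorem segs_cons_pos (p : List String) (l0 l1 : String) (rest2 : List String)
    (h : (is_pipe_line l0 && is_separator_line l1) = true) :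
    segs_go p (l0 :: l1 :: rest2) =
      (p, l0 :: l1 :: rest2.takeWhile is_pipe_line) ::
        segs_go [] (rest2.dropWhile is_pipe_line) := by
  rw [segs_go]; simp [h]

theorem emit_cons (plain block : List String) (rest : List (List String × List String)) :
    emit ((plain, block) :: rest) =
      plain ++
        (if block ≠ [] then
          (if plain ≠ [] ∧ PySem.Str.strip (plain.getLastD "") ≠ "" then [""] else []) ++
          block.map PySem.Str.strip ++
          (if (rest.headD ([], [])).1 ++ (rest.headD ([], [])).2 ≠ [] ∧
              PySem.Str.strip (((rest.headD ([], [])).1 ++ (rest.headD ([], [])).2).headD "") ≠ ""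
           then [""] else [])
        else []) ++ emit rest := by
  rw [emit]

-- the first segment of `segs_go p ls` flattens to `p ++ u` for a prefix `u` of `ls`,
-- nonempty whenever `ls` is
theorem segs_head : ∀ (n : Nat) (ls : List String) (p : List String), ls.length ≤ n →
    ∃ u, u <+: ls ∧ (ls ≠ [] → u ≠ []) ∧
      ((segs_go p ls).headD ([], [])).1 ++ ((segs_go p ls).headD ([], [])).2 = p ++ u := by
  intro n
  induction n with
  | zero =>
    intro ls p h
    have hls : ls = [] := by cases ls <;> simp_all
    subst hls
    exact ⟨[], by simp, by simp, by rw [segs_nil]; simp⟩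
  | succ n ih =>
    intro ls p h
    match ls with
    | [] => exact ⟨[], by simp, by simp, by rw [segs_nil]; simp⟩
    | [l0] => exact ⟨[l0], by simp, by simp, by rw [segs_one]; simp⟩
    | l0 :: l1 :: rest2 =>
      by_cases hb : (is_pipe_line l0 && is_separator_line l1) = true
      · refine ⟨l0 :: l1 :: rest2.takeWhile is_pipe_line, ?_, by simp, ?_⟩
        · exact List.cons_prefix_cons.mpr ⟨rfl, List.cons_prefix_cons.mpr ⟨rfl, List.takeWhile_prefix _⟩⟩
        · rw [segs_cons_pos _ _ _ _ hb]; simp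
      · have hb' : (is_pipe_line l0 && is_separator_line l1) = false := by simpa using hb
        obtain ⟨u, hu1, hu2, hu3⟩ := ih (l1 :: rest2) (p ++ [l0]) (by simp at h ⊢; omega)
        refine ⟨l0 :: u, ?_, by simp, ?_⟩
        · simpa [List.cons_prefix_cons] using hu1
        · rw [segs_cons_neg _ _ _ _ hb', hu3]
          simp

-- main invariant: A's accumulator loop = already-emitted prefix ++ B's segment emission
theorem loopA_emit : ∀ (n : Nat) (ls : List String), ls.length ≤ n → ∀ (r p : List String),
    (p ≠ [] ∨ r = [] ∨ ¬ isBlockStart ls) →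
    loopA (r ++ p) ls = r ++ emit (segs_go p ls) := by
  intro n
  induction n with
  | zero =>
    intro ls h r p _
    have hls : ls = [] := by cases ls <;> simp_all
    subst hls
    simp [loopA_nil, segs_nil, emit]
  | succ n ih =>
    intro ls h r p hyp
    match ls with
    | [] => simp [loopA_nil, segs_nil, emit]
    | [l0] =>
      have hc : (is_pipe_line l0 && is_separator_line (([] : List String).head?.getD "")) = false := by
        simp [sep_empty]
      rw [loopA_cons_neg _ _ _ hc]
      have h2 := ih [] (by simp) r (p ++ [l0]) (Or.inl (by simp))
      rw [← List.append_assoc, segs_nil] at h2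
      rw [h2, segs_one]
    | l0 :: l1 :: rest2 =>
      by_cases hb : (is_pipe_line l0 && is_separator_line l1) = true
      · -- a table block starts here
        have hcase : p ≠ [] ∨ (p = [] ∧ r = []) := by
          rcases hyp with h1 | h1 | h1
          · exact Or.inl h1
          · by_cases hp : p = []
            · exact Or.inr ⟨hp, h1⟩
            · exact Or.inl hp
          · exact absurd hb h1
        have condEq : ((r ++ p ≠ [] ∧ PySem.Str.strip ((r ++ p).getLastD "") ≠ "")) ↔
            (p ≠ [] ∧ PySem.Str.strip (p.getLastD "") ≠ "") := by
          rcases hcase with hp | ⟨hp, hr⟩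
          · rw [getLastD_app p hp r]
            simp [hp]
          · subst hp; subst hr; simp
        rw [loopA_cons_pos _ _ _ _ hb, segs_cons_pos _ _ _ _ hb]
        set rows := rest2.takeWhile is_pipe_line with hrows
        set after := rest2.dropWhile is_pipe_line with hafter
        have hlenAfter : after.length ≤ rest2.length := by
          rw [hafter]; exact List.length_dropWhile_le _ _
        obtain ⟨u, hu1, hu2, hu3⟩ := segs_head n after [] (by simp at h; omega)
        have postEq : (((segs_go [] after).headD ([], [])).1 ++
              ((segs_go [] after).headD ([], [])).2 ≠ [] ∧
              PySem.Str.strip ((((segs_go [] after).headD ([], [])).1 ++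
                ((segs_go [] after).headD ([], [])).2).headD "") ≠ "") ↔
            (after ≠ [] ∧ PySem.Str.strip (after.headD "") ≠ "") := by
          rw [hu3]
          cases hA : after with
          | nil =>
            have hu0 : u = [] := by rw [hA] at hu1; simpa using hu1
            simp [hu0]
          | cons a t =>
            have hune : u ≠ [] := hu2 (by simp [hA])
            obtain ⟨v, hv⟩ := hu1
            rw [hA] at hv
            cases u with
            | nil => exact absurd rfl hune
            | cons u0 ut =>
              simp only [List.cons_append, List.cons.injEq] at hv
              simp [hv.1]
        have hnb : ¬ isBlockStart after := by
          cases hA : after with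
          | nil => simp [isBlockStart]
          | cons a t =>
            have hpa : is_pipe_line a = false := dropWhile_head _ _ _ _ (hafter ▸ hA)
            cases t with
            | nil => simp [isBlockStart]
            | cons b t2 => simp [isBlockStart, hpa]
        have hIH := ih after (by simp at h; omega)
          (((if r ++ p ≠ [] ∧ PySem.Str.strip ((r ++ p).getLastD "") ≠ "" then (r ++ p) ++ [""] else r ++ p)
            ++ [PySem.Str.strip l0, PySem.Str.strip l1] ++ rows.map PySem.Str.strip)
            ++ (if after ≠ [] ∧ PySem.Str.strip (after.headD "") ≠ "" then [""] else []))
          [] (Or.inr (Or.inr hnb))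
        rw [List.append_nil] at hIH
        rw [hIH, emit_cons]
        rw [if_pos (by simp : (l0 :: l1 :: rows : List String) ≠ [])]
        simp only [condEq, postEq, List.map_cons]
        split_ifs <;> simp [List.append_assoc]
      · have hb' : (is_pipe_line l0 && is_separator_line l1) = false := by simpa using hb
        have hc : (is_pipe_line l0 && is_separator_line ((l1 :: rest2).head?.getD "")) = false := by
          simpa using hb'
        rw [loopA_cons_neg _ _ _ hc, segs_cons_neg _ _ _ _ hb']
        have h2 := ih (l1 :: rest2) (by simp at h ⊢; omega) r (p ++ [l0]) (Or.inl (by simp))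
        rw [← List.append_assoc] at h2
        exact h2

theorem phase1_eq (ls : List String) (c : Bool) (acc : List String) :
    phase1A c acc ls = (ls.foldl (fun (st : Bool × List String) line =>
      let stripped := PySem.Str.lstrip line
      if PySem.Str.startswith stripped "```" then (!st.1, st.2 ++ [line])
      else if !st.1 && PySem.Str.startswith stripped "|" then (st.1, st.2 ++ [stripped])
      else (st.1, st.2 ++ [line])) (c, acc)).2 := by
  induction ls generalizing c acc with
  | nil => rfl
  | cons l rest ih =>
    simp only [phase1A, List.foldl_cons]
    split_ifs <;> apply ih

theorem phase1AB (ls : List String) : phase1A false [] ls = phase1B ls := by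
  unfold phase1B
  exact phase1_eq ls false []

-- ===== VERDICT (by name: the statement is the Claim_ definition above) =====
theorem normalize_markdown_tables_spec : Claim_equal_normalize_markdown_tables := by
  intro md _
  unfold Spec_normalize_markdown_tables normalize_markdown_tables normalize_markdown_tables_alt
  rw [← phase1AB]
  congr 1
  have := loopA_emit (phase1A false [] (PySem.Str.splitlines md)).length
    (phase1A false [] (PySem.Str.splitlines md)) le_rfl [] [] (Or.inr (Or.inl rfl))
  simpa using this
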